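-- pv_equiv track=rewrite | github.com/AlexKo1984/Site_from_description | ak_test_fun.py | textToTextForTest
-- ===== SOURCE A (Python) =====
-- def textToTextForTest(text):
--     '''Преобразует текст в текст для тестирования. Заменяет пробелы не "_", убирает ентер, таб.'''
--     result = text.strip()
--
--     while result.count('  ') != 0:
--         result = result.replace('  ', ' ')
--
--     result = result.replace(' ', '_')
--     result = result.replace('\n', '')
--     result = result.replace('\t', '_')
--     result = result.upper()
--
--     return result
-- ===== SOURCE B (Python) =====
-- def textToTextForTest(text):
--     '''One pass over the stripped text with a prev-was-space flag instead of a
--     collapse-replace loop plus three full replace passes.'''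
--     out = []
--     prev_space = False
--     for ch in text.strip():
--         if ch == ' ':
--             if not prev_space:
--                 out.append('_')
--             prev_space = True
--         elif ch == '\t':
--             out.append('_')
--             prev_space = False
--         elif ch == '\n':
--             prev_space = False
--         else:
--             out.append(ch)
--             prev_space = False
--     return ''.join(out).upper()
-- ===== Notes on version B (the rewrite author's own statement) =====
-- stated objective: simpler
-- what changed: Replaces the collapse-replace while-loop plus three whole-string replace passes by a single pass over the stripped text with a prev-was-space flag that collapses space runs and rewrites each character in place.
import Mathlib
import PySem

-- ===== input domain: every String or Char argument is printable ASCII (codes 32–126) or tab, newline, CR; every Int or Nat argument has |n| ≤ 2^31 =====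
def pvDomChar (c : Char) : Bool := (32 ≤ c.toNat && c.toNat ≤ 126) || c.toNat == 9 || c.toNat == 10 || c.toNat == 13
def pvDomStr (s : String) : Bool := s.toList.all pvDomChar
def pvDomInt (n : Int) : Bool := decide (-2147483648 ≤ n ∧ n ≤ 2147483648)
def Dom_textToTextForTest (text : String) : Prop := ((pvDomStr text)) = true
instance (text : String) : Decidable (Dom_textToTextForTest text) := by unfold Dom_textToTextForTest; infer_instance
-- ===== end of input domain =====

-- B replaces A's collapse-replace while-loop plus three whole-string replace passes by a
-- single pass over the stripped text with a prev-was-space flag (simpler: one traversal).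

-- ===== PORT A =====
-- `repSp`/`cntSp` are one-step specifications of s.replace('  ', ' ') / s.count('  ')
-- needed by the port's termination proof (`replace_shrinks`, cited in `decreasing_by`).
def repSp : List Char → List Char
  | [] => []
  | [c] => [c]
  | c :: c2 :: t => if c = ' ' ∧ c2 = ' ' then ' ' :: repSp t else c :: repSp (c2 :: t)

def cntSp : List Char → Nat
  | [] => 0
  | [_] => 0
  | c :: c2 :: t => if c = ' ' ∧ c2 = ' ' then cntSp t + 1 else cntSp (c2 :: t)

theorem replaceGo_pair (fuel : Nat) : ∀ (l acc : List Char), l.length ≤ fuel →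
    PySem.Chars.replace.go [' ', ' '] [' '] fuel l acc = acc.reverse ++ repSp l := by
  induction fuel with
  | zero =>
    intro l acc h
    have hl : l = [] := by cases l <;> simp_all
    subst hl; simp [PySem.Chars.replace.go, repSp]
  | succ fuel ih =>
    intro l acc h
    cases l with
    | nil => simp [PySem.Chars.replace.go, repSp]
    | cons c t =>
      by_cases hc : c = ' '
      · cases t with
        | nil =>
          subst hc
          simp only [PySem.Chars.replace.go, List.isPrefixOf, beq_self_eq_true]
          rw [if_neg (by simp)]
          rw [ih [] (' ' :: acc) (by simp)]
          simp [repSp]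
        | cons c2 t2 =>
          by_cases hc2 : c2 = ' '
          · subst hc; subst hc2
            simp only [PySem.Chars.replace.go, List.isPrefixOf, beq_self_eq_true,
              Bool.and_true, if_true, List.length_cons, List.drop_succ_cons, List.drop_zero,
              List.length_nil]
            rw [ih t2 ([' '].reverse ++ acc) (by simp at h; omega)]
            simp [repSp]
          · subst hc
            simp only [PySem.Chars.replace.go, List.isPrefixOf, beq_self_eq_true,
              Bool.and_true]
            rw [if_neg (by simp [Ne.symm hc2])]
            rw [ih (c2 :: t2) (' ' :: acc) (by simp at h ⊢; omega)]
            simp [repSp, hc2]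
      · simp only [PySem.Chars.replace.go, List.isPrefixOf]
        rw [if_neg (by simp [Ne.symm hc])]
        rw [ih t (c :: acc) (by simp at h; omega)]
        cases t with
        | nil => simp [repSp]
        | cons c2 t2 => simp [repSp, hc]

theorem countGo_pair (fuel : Nat) : ∀ (l : List Char) (acc : Nat), l.length ≤ fuel →
    PySem.Chars.count.go [' ', ' '] fuel l acc = acc + cntSp l := by
  induction fuel with
  | zero =>
    intro l acc h
    have hl : l = [] := by cases l <;> simp_all
    subst hl; simp [PySem.Chars.count.go, cntSp]
  | succ fuel ih =>
    intro l acc h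
    cases l with
    | nil => simp [PySem.Chars.count.go, cntSp]
    | cons c t =>
      by_cases hc : c = ' '
      · cases t with
        | nil =>
          subst hc
          simp only [PySem.Chars.count.go, List.isPrefixOf, beq_self_eq_true]
          rw [if_neg (by simp)]
          rw [ih [] (acc) (by simp)]
          simp [cntSp]
        | cons c2 t2 =>
          by_cases hc2 : c2 = ' '
          · subst hc; subst hc2
            simp only [PySem.Chars.count.go, List.isPrefixOf, beq_self_eq_true,
              Bool.and_true, if_true, List.length_cons, List.drop_succ_cons, List.drop_zero,
              List.length_nil]
            rw [ih t2 (acc + 1) (by simp at h; omega)]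
            simp [cntSp]; omega
          · subst hc
            simp only [PySem.Chars.count.go, List.isPrefixOf, beq_self_eq_true,
              Bool.and_true]
            rw [if_neg (by simp [Ne.symm hc2])]
            rw [ih (c2 :: t2) acc (by simp at h ⊢; omega)]
            simp [cntSp, hc2]
      · simp only [PySem.Chars.count.go, List.isPrefixOf]
        rw [if_neg (by simp [Ne.symm hc])]
        rw [ih t acc (by simp at h; omega)]
        cases t with
        | nil => simp [cntSp]
        | cons c2 t2 => simp [cntSp, hc]

theorem replace_pair_eq (l : List Char) :
    PySem.Chars.replace l [' ', ' '] [' '] = repSp l := by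
  simp only [PySem.Chars.replace, List.isEmpty_cons, Bool.false_eq_true, if_false]
  exact replaceGo_pair l.length l [] le_rfl

theorem count_pair_eq (l : List Char) :
    PySem.Chars.count l [' ', ' '] = cntSp l := by
  simp only [PySem.Chars.count, List.isEmpty_cons, Bool.false_eq_true, if_false]
  simpa using countGo_pair l.length l 0 le_rfl

theorem repSp_length_le (l : List Char) : (repSp l).length ≤ l.length := by
  induction l using repSp.induct with
  | case1 => simp [repSp]
  | case2 c => simp [repSp]
  | case3 c c2 t hcc ih => simp only [repSp, if_pos hcc]; simp at ih ⊢; omega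
  | case4 c c2 t hcc ih => simp only [repSp, if_neg hcc]; simp at ih ⊢; omega

theorem length_repSp_lt (l : List Char) (h : cntSp l ≠ 0) :
    (repSp l).length < l.length := by
  induction l using repSp.induct with
  | case1 => simp [cntSp] at h
  | case2 c => simp [cntSp] at h
  | case3 c c2 t hcc ih =>
    simp only [repSp, if_pos hcc]
    have := repSp_length_le t
    simp; omega
  | case4 c c2 t hcc ih =>
    simp only [cntSp, if_neg hcc] at h
    simp only [repSp, if_neg hcc]
    have := ih h
    simp at this ⊢; omega

theorem replace_shrinks (s : String) (h : PySem.Str.count s "  " ≠ 0) :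
    (PySem.Str.replace s "  " " ").toList.length < s.toList.length := by
  have hts : ("  " : String).toList = [' ', ' '] := by decide
  have htn : (" " : String).toList = [' '] := by decide
  rw [PySem.Str.toList_replace, hts, htn, replace_pair_eq]
  apply length_repSp_lt
  rw [PySem.Str.count_eq, hts, count_pair_eq] at h
  exact h

-- while result.count('  ') != 0: result = result.replace('  ', ' ')
def collapseA (s : String) : String :=
  if PySem.Str.count s "  " ≠ 0 then collapseA (PySem.Str.replace s "  " " ") else s
termination_by s.toList.length
decreasing_by exact replace_shrinks s (by assumption)

def textToTextForTest (text : String) : String :=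
  let result := PySem.Str.strip text
  let result := collapseA result
  let result := PySem.Str.replace result " " "_"
  let result := PySem.Str.replace result "\n" ""
  let result := PySem.Str.replace result "\t" "_"
  PySem.Str.upper result

-- ===== PORT B =====
-- the loop body of Source B: state = (out, prev_space)
def bStep (st : List Char × Bool) (ch : Char) : List Char × Bool :=
  if ch = ' ' then (if st.2 then (st.1, true) else (st.1 ++ ['_'], true))
  else if ch = '\t' then (st.1 ++ ['_'], false)
  else if ch = '\n' then (st.1, false)
  else (st.1 ++ [ch], false)

def textToTextForTest_alt (text : String) : String :=
  let out := ((PySem.Str.strip text).toList.foldl bStep ([], false)).1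
  PySem.Str.upper (String.ofList (PySem.Chars.join [] (out.map (fun c => [c]))))

-- ===== PRECONDITION & SPEC =====
def Spec_textToTextForTest (text : String) (out : String) : Prop := out = textToTextForTest_alt text
instance (text : String) (out : String) : Decidable (Spec_textToTextForTest text out) := by unfold Spec_textToTextForTest; infer_instance

-- ===== CLAIM (what is proved, stated in full; the proofs are below) =====
def Claim_equal_textToTextForTest : Prop := ∀ (text : String), Dom_textToTextForTest text → Spec_textToTextForTest text (textToTextForTest text)

-- ===== LEMMAS AND PROOFS =====

-- the fixed point of the collapse loop, computed with a flag (last char emitted was a space)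
def dedupF : Bool → List Char → List Char
  | _, [] => []
  | p, c :: t =>
    if c = ' ' then (if p then dedupF true t else ' ' :: dedupF true t)
    else c :: dedupF false t

-- the result of Source B's loop, as a function (out is built in front)
def bpass : Bool → List Char → List Char
  | _, [] => []
  | p, c :: t =>
    if c = ' ' then (if p then bpass true t else '_' :: bpass true t)
    else if c = '\t' then '_' :: bpass false t
    else if c = '\n' then bpass false t
    else c :: bpass false t

theorem dedupF_repSp (l : List Char) : ∀ p, dedupF p (repSp l) = dedupF p l := by
  induction l using repSp.induct with
  | case1 => intro p; simp [repSp]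
  | case2 c => intro p; simp [repSp]
  | case3 c c2 t hcc ih =>
    intro p
    obtain ⟨rfl, rfl⟩ := hcc
    cases p <;> simp [repSp, dedupF, ih]
  | case4 c c2 t hcc ih =>
    intro p
    simp only [repSp, if_neg hcc]
    by_cases hc : c = ' '
    · subst hc
      cases p <;> simp [dedupF, ih]
    · simp [dedupF, hc, ih]

theorem cnt_zero_fix (l : List Char) (h0 : cntSp l = 0) : dedupF false l = l := by
  induction l using cntSp.induct with
  | case1 => simp [dedupF]
  | case2 c => by_cases hc : c = ' ' <;> simp [dedupF, hc]
  | case3 c c2 t hcc ih => simp [cntSp, if_pos hcc] at h0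
  | case4 c c2 t hcc ih =>
    simp only [cntSp, if_neg hcc] at h0
    have ih' := ih h0
    by_cases hc : c = ' '
    · subst hc
      have hc2 : ¬ c2 = ' ' := fun e => hcc ⟨rfl, e⟩
      have ht : dedupF false t = t := by
        simpa [dedupF, hc2] using ih'
      simp [dedupF, hc2, ht]
    · simp only [dedupF, if_neg hc]
      simpa [dedupF] using ih'

theorem collapseA_toList (s : String) : (collapseA s).toList = dedupF false s.toList := by
  induction s using collapseA.induct with
  | case1 s h ih =>
    rw [collapseA, if_pos h, ih]
    have hts : ("  " : String).toList = [' ', ' '] := by decide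
    have htn : (" " : String).toList = [' '] := by decide
    rw [PySem.Str.toList_replace, hts, htn, replace_pair_eq]
    exact dedupF_repSp s.toList false
  | case2 s h =>
    rw [collapseA, if_neg h]
    refine (cnt_zero_fix s.toList ?_).symm
    have hts : ("  " : String).toList = [' ', ' '] := by decide
    simp only [ne_eq, not_not] at h
    rw [PySem.Str.count_eq, hts, count_pair_eq] at h
    exact h

theorem replaceGo_single (o : Char) (new : List Char) (fuel : Nat) :
    ∀ (l acc : List Char), l.length ≤ fuel →
    PySem.Chars.replace.go [o] new fuel l acc
      = acc.reverse ++ l.flatMap (fun c => if c = o then new else [c]) := by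
  induction fuel with
  | zero =>
    intro l acc h
    have hl : l = [] := by cases l <;> simp_all
    subst hl; simp [PySem.Chars.replace.go]
  | succ fuel ih =>
    intro l acc h
    cases l with
    | nil => simp [PySem.Chars.replace.go]
    | cons c t =>
      by_cases hc : c = o
      · subst hc
        simp only [PySem.Chars.replace.go, List.isPrefixOf, beq_self_eq_true, Bool.and_true,
          if_true, List.length_cons, List.drop_succ_cons, List.length_nil, List.drop_zero]
        rw [ih t (new.reverse ++ acc) (by simp at h; omega)]
        simp
      · simp only [PySem.Chars.replace.go, List.isPrefixOf]
        rw [if_neg (by simp [Ne.symm hc])]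
        rw [ih t (c :: acc) (by simp at h; omega)]
        simp [hc]

theorem replace_single_eq (l : List Char) (o : Char) (new : List Char) :
    PySem.Chars.replace l [o] new = l.flatMap (fun c => if c = o then new else [c]) := by
  simp only [PySem.Chars.replace, List.isEmpty_cons, Bool.false_eq_true, if_false]
  exact replaceGo_single o new l.length l [] le_rfl

theorem chain (l : List Char) : ∀ p,
    (((dedupF p l).flatMap (fun c => if c = ' ' then ['_'] else [c])).flatMap
        (fun c => if c = '\n' then ([] : List Char) else [c])).flatMap
      (fun c => if c = '\t' then ['_'] else [c]) = bpass p l := by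
  induction l with
  | nil => intro p; simp [dedupF, bpass]
  | cons c t ih =>
    intro p
    by_cases hc : c = ' '
    · subst hc
      cases p <;> simp [dedupF, bpass, ih]
    · by_cases ht : c = '\t'
      · subst ht; simp [dedupF, bpass, ih]
      · by_cases hn : c = '\n'
        · subst hn; simp [dedupF, bpass, ih]
        · simp [dedupF, bpass, hc, ht, hn, ih]

theorem foldl_bStep (l : List Char) : ∀ (out : List Char) (p : Bool),
    (l.foldl bStep (out, p)).1 = out ++ bpass p l := by
  induction l with
  | nil => intro out p; simp [bpass]
  | cons c t ih =>
    intro out p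
    by_cases hc : c = ' '
    · subst hc
      cases p <;> simp [List.foldl_cons, bStep, bpass, ih]
    · by_cases ht : c = '\t'
      · subst ht; simp [List.foldl_cons, bStep, bpass, ih]
      · by_cases hn : c = '\n'
        · subst hn; simp [List.foldl_cons, bStep, bpass, hc, ih]
        · simp [List.foldl_cons, bStep, bpass, hc, ht, hn, ih]

-- ===== VERDICT (by name: the statement is the Claim_ definition above) =====
theorem textToTextForTest_spec : Claim_equal_textToTextForTest := by
  intro text _
  unfold Spec_textToTextForTest
  simp only [textToTextForTest, textToTextForTest_alt]
  have hsp : (" " : String).toList = [' '] := by decide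
  have hus : ("_" : String).toList = ['_'] := by decide
  have hnl : ("\n" : String).toList = ['\n'] := by decide
  have hem : ("" : String).toList = ([] : List Char) := by decide
  have htb : ("\t" : String).toList = ['\t'] := by decide
  simp only [PySem.Str.upper]
  refine congrArg String.ofList (congrArg PySem.Chars.upper ?_)
  rw [PySem.Str.toList_replace, PySem.Str.toList_replace, PySem.Str.toList_replace,
    hsp, hus, hnl, hem, htb, collapseA_toList]
  rw [replace_single_eq, replace_single_eq, replace_single_eq]
  rw [chain]
  rw [String.toList_ofList, PySem.Chars.join_nil_singletons]
  rw [foldl_bStep]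
  simp
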